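-- pv_equiv track=rewrite | github.com/grapheneaffiliate/h4-polytopic-attention | solve_arc2_train_aa.py | solve_007bbfb7
-- ===== SOURCE A (Python) =====
-- def solve_007bbfb7(grid):
--     R, C = len(grid), len(grid[0])
--     out = [[0]*(C*C) for _ in range(R*R)]
--     for r in range(R):
--         for c in range(C):
--             if grid[r][c] != 0:
--                 for r2 in range(R):
--                     for c2 in range(C):
--                         if grid[r2][c2] != 0:
--                             out[r*R + r2][c*C + c2] = grid[r2][c2]
--     return out
-- ===== SOURCE B (Python) =====
-- def solve_007bbfb7(grid):
--     R, C = len(grid), len(grid[0])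
--     out = []
--     for r in range(R):
--         for r2 in range(R):
--             row = []
--             for c in range(C):
--                 if grid[r][c] != 0:
--                     row.extend(grid[r2][:C])
--                 else:
--                     row.extend([0] * C)
--             out.append(row)
--     return out
-- ===== Notes on version B (the rewrite author's own statement) =====
-- stated objective: simpler
-- what changed: B assembles each output row by concatenating copies of grid rows / zero blocks instead of preallocating an R*R x C*C zero grid and scatter-writing nonzero cells into it.
import Mathlib
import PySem

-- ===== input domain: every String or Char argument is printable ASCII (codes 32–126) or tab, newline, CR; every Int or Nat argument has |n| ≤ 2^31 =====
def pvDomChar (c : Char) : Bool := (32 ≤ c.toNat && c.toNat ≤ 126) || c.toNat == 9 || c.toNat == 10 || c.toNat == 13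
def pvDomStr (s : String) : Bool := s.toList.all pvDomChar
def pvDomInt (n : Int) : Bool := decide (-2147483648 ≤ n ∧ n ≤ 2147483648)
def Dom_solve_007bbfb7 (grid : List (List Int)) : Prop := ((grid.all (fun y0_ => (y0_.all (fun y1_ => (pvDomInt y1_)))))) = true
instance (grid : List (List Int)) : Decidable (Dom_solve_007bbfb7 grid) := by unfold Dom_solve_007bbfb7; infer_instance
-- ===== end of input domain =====

-- B builds each output row by concatenating row/zero blocks instead of scatter-writing
-- nonzero cells into a preallocated R*R × C*C zero grid (objective: simpler; same cost).

-- ===== PORT A =====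
-- grid[r][c] (indices produced by range, in bounds on Pre_) ported as getD; exact on Pre_.
def solve_007bbfb7 (grid : List (List Int)) : List (List Int) :=
  let R := grid.length
  let C := (grid.headD []).length
  let out := (List.range (R*R)).map (fun _ => List.replicate (C*C) (0:Int))
  (List.range R).foldl (fun out r =>
    (List.range C).foldl (fun out c =>
      if (grid.getD r []).getD c 0 ≠ 0 then
        (List.range R).foldl (fun out r2 =>
          (List.range C).foldl (fun out c2 =>
            if (grid.getD r2 []).getD c2 0 ≠ 0 then
              out.modify (r*R + r2) (fun row => row.set (c*C + c2) ((grid.getD r2 []).getD c2 0))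
            else out) out) out
      else out) out) out

-- ===== PORT B =====
def solve_007bbfb7_alt (grid : List (List Int)) : List (List Int) :=
  let R := grid.length
  let C := (grid.headD []).length
  (List.range R).foldl (fun out r =>
    (List.range R).foldl (fun out r2 =>
      out ++ [(List.range C).foldl (fun row c =>
        row ++ (if (grid.getD r []).getD c 0 ≠ 0 then (grid.getD r2 []).take C
                else List.replicate C 0)) []]) out) []

-- ===== PRECONDITION & SPEC =====
-- Pre_ excludes exactly the inputs on which A raises: the empty grid (len(grid[0]) is an
-- IndexError) and grids with some row shorter than the first row (grid[r][c] IndexError).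
def Pre_solve_007bbfb7 (grid : List (List Int)) : Prop :=
  grid ≠ [] ∧ grid.all (fun row => Nat.ble (grid.headD []).length row.length) = true
instance (grid : List (List Int)) : Decidable (Pre_solve_007bbfb7 grid) := by unfold Pre_solve_007bbfb7; infer_instance
def pvWitness_solve_007bbfb7 : List (List Int) := [[1, 0], [0, 2]]

def Spec_solve_007bbfb7 (grid : List (List Int)) (out : List (List Int)) : Prop := out = solve_007bbfb7_alt grid
instance (grid : List (List Int)) (out : List (List Int)) : Decidable (Spec_solve_007bbfb7 grid out) := by unfold Spec_solve_007bbfb7; infer_instance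

-- ===== CLAIM (what is proved, stated in full; the proofs are below) =====
def Claim_equal_solve_007bbfb7 : Prop := ∀ (grid : List (List Int)), Dom_solve_007bbfb7 grid → Pre_solve_007bbfb7 grid → Spec_solve_007bbfb7 grid (solve_007bbfb7 grid)

-- ===== LEMMAS AND PROOFS =====

-- A single cell write out[i][j] := v, and a sequence of them.
def pvWrite (o : List (List Int)) (w : Nat × Nat × Int) : List (List Int) :=
  o.modify w.1 (fun row => row.set w.2.1 w.2.2)

def pvApply (o : List (List Int)) (ws : List (Nat × Nat × Int)) : List (List Int) :=
  ws.foldl pvWrite o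

def pvCell (o : List (List Int)) (i j : Nat) : Int := (o.getD i []).getD j 0

def pvG (grid : List (List Int)) (r c : Nat) : Int := (grid.getD r []).getD c 0

-- the list of writes A performs, in order
def pvWrites (grid : List (List Int)) : List (Nat × Nat × Int) :=
  let R := grid.length
  let C := (grid.headD []).length
  (List.range R).flatMap (fun r =>
    (List.range C).flatMap (fun c =>
      if pvG grid r c ≠ 0 then
        (List.range R).flatMap (fun r2 =>
          (List.range C).flatMap (fun c2 =>
            if pvG grid r2 c2 ≠ 0 then [(r*R + r2, c*C + c2, pvG grid r2 c2)]
            else []))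
      else []))

-- B's row (r, r2) and the list of all of B's rows
def pvRow (grid : List (List Int)) (r r2 : Nat) : List Int :=
  (List.range (grid.headD []).length).flatMap (fun c =>
    if pvG grid r c ≠ 0 then (grid.getD r2 []).take (grid.headD []).length
    else List.replicate (grid.headD []).length 0)

theorem pvApply_append (o : List (List Int)) (a b : List (Nat × Nat × Int)) :
    pvApply o (a ++ b) = pvApply (pvApply o a) b := by
  simp [pvApply, List.foldl_append]

theorem foldl_pvApply (f : Nat → List (Nat × Nat × Int)) (l : List Nat) (o : List (List Int)) :
    l.foldl (fun o x => pvApply o (f x)) o = pvApply o (l.flatMap f) := by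
  induction l generalizing o with
  | nil => simp [pvApply]
  | cons a l ih => simp [List.flatMap_cons, pvApply_append, ih]

theorem foldl_pvApply_if (f : Nat → List (Nat × Nat × Int)) (P : Nat → Prop) [DecidablePred P]
    (l : List Nat) (o : List (List Int)) :
    l.foldl (fun o x => if P x then pvApply o (f x) else o) o
      = pvApply o (l.flatMap (fun x => if P x then f x else [])) := by
  rw [← foldl_pvApply]
  congr 1
  funext o x
  split <;> simp [pvApply]

theorem solve_eq_pvApply (grid : List (List Int)) :
    solve_007bbfb7 grid =
      pvApply ((List.range (grid.length * grid.length)).map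
        (fun _ => List.replicate ((grid.headD []).length * (grid.headD []).length) (0:Int)))
        (pvWrites grid) := by
  unfold solve_007bbfb7 pvWrites
  simp only [pvG]
  have h4 : ∀ (r c r2 : Nat) (o : List (List Int)),
      (List.range (grid.headD []).length).foldl (fun out c2 =>
        if (grid.getD r2 []).getD c2 0 ≠ 0 then
          out.modify (r*grid.length + r2) (fun row => row.set (c*(grid.headD []).length + c2) ((grid.getD r2 []).getD c2 0))
        else out) o
      = pvApply o ((List.range (grid.headD []).length).flatMap (fun c2 =>
          if (grid.getD r2 []).getD c2 0 ≠ 0 then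
            [(r*grid.length + r2, c*(grid.headD []).length + c2, (grid.getD r2 []).getD c2 0)]
          else [])) := by
    intro r c r2 o
    rw [← foldl_pvApply_if (fun c2 => [(r*grid.length + r2, c*(grid.headD []).length + c2, (grid.getD r2 []).getD c2 0)])
          (fun c2 => (grid.getD r2 []).getD c2 0 ≠ 0)]
    congr 1
  have h3 : ∀ (r c : Nat) (o : List (List Int)),
      (List.range grid.length).foldl (fun out r2 =>
        (List.range (grid.headD []).length).foldl (fun out c2 =>
          if (grid.getD r2 []).getD c2 0 ≠ 0 then
            out.modify (r*grid.length + r2) (fun row => row.set (c*(grid.headD []).length + c2) ((grid.getD r2 []).getD c2 0))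
          else out) out) o
      = pvApply o ((List.range grid.length).flatMap (fun r2 =>
          (List.range (grid.headD []).length).flatMap (fun c2 =>
            if (grid.getD r2 []).getD c2 0 ≠ 0 then
              [(r*grid.length + r2, c*(grid.headD []).length + c2, (grid.getD r2 []).getD c2 0)]
            else []))) := by
    intro r c o
    rw [← foldl_pvApply]
    congr 1
    funext o r2
    exact h4 r c r2 o
  have h2 : ∀ (r : Nat) (o : List (List Int)),
      (List.range (grid.headD []).length).foldl (fun out c =>
        if (grid.getD r []).getD c 0 ≠ 0 then
          (List.range grid.length).foldl (fun out r2 =>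
            (List.range (grid.headD []).length).foldl (fun out c2 =>
              if (grid.getD r2 []).getD c2 0 ≠ 0 then
                out.modify (r*grid.length + r2) (fun row => row.set (c*(grid.headD []).length + c2) ((grid.getD r2 []).getD c2 0))
              else out) out) out
        else out) o
      = pvApply o ((List.range (grid.headD []).length).flatMap (fun c =>
          if (grid.getD r []).getD c 0 ≠ 0 then
            (List.range grid.length).flatMap (fun r2 =>
              (List.range (grid.headD []).length).flatMap (fun c2 =>
                if (grid.getD r2 []).getD c2 0 ≠ 0 then
                  [(r*grid.length + r2, c*(grid.headD []).length + c2, (grid.getD r2 []).getD c2 0)]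
                else []))
          else [])) := by
    intro r o
    rw [← foldl_pvApply_if]
    congr 1
    funext o c
    by_cases h : (grid.getD r []).getD c 0 ≠ 0
    · rw [if_pos h, if_pos h, h3 r c o]
    · rw [if_neg h, if_neg h]
  rw [← foldl_pvApply]
  congr 1
  funext o r
  exact h2 r o

-- lengths are preserved by writes
theorem pvApply_length (o : List (List Int)) (ws : List (Nat × Nat × Int)) :
    (pvApply o ws).length = o.length := by
  induction ws generalizing o with
  | nil => rfl
  | cons w ws ih =>
      show (pvApply (pvWrite o w) ws).length = o.length
      rw [ih]
      simp [pvWrite]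

theorem pvWrite_getElem? (o : List (List Int)) (w : Nat × Nat × Int) (i : Nat) :
    (pvWrite o w)[i]? = if w.1 = i then (o[i]?).map (fun row => row.set w.2.1 w.2.2) else o[i]? := by
  simp only [pvWrite, List.getElem?_modify]
  by_cases h : w.1 = i
  · simp only [h]
    cases o[i]? <;> simp
  · simp only [if_neg h]
    cases o[i]? <;> simp

theorem pvApply_rowlen (o : List (List Int)) (ws : List (Nat × Nat × Int)) (i : Nat) :
    ((pvApply o ws).getD i []).length = (o.getD i []).length := by
  induction ws generalizing o with
  | nil => rfl
  | cons w ws ih =>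
      show ((pvApply (pvWrite o w) ws).getD i []).length = (o.getD i []).length
      rw [ih]
      simp only [List.getD_eq_getElem?_getD, pvWrite_getElem?]
      by_cases h : w.1 = i
      · simp only [if_pos h]
        cases o[i]? <;> simp
      · simp [h]

theorem pvWrite_cell_ne (o : List (List Int)) (w : Nat × Nat × Int) (i j : Nat)
    (h : ¬(w.1 = i ∧ w.2.1 = j)) : pvCell (pvWrite o w) i j = pvCell o i j := by
  simp only [pvCell, List.getD_eq_getElem?_getD, pvWrite_getElem?]
  by_cases h1 : w.1 = i
  · simp only [h1]
    have h2 : w.2.1 ≠ j := fun hj => h ⟨h1, hj⟩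
    cases o[i]? with
    | none => rfl
    | some row => simp [h2]
  · simp [h1]

theorem pvApply_cell_none (o : List (List Int)) (ws : List (Nat × Nat × Int)) (i j : Nat)
    (h : ∀ w ∈ ws, ¬(w.1 = i ∧ w.2.1 = j)) : pvCell (pvApply o ws) i j = pvCell o i j := by
  induction ws generalizing o with
  | nil => rfl
  | cons w ws ih =>
      show pvCell (pvApply (pvWrite o w) ws) i j = pvCell o i j
      rw [ih _ (fun w' hw' => h w' (List.mem_cons_of_mem _ hw'))]
      exact pvWrite_cell_ne o w i j (h w (List.mem_cons_self))

theorem pvWrite_cell_self (o : List (List Int)) (w : Nat × Nat × Int)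
    (hi : w.1 < o.length) (hj : w.2.1 < (o.getD w.1 []).length) :
    pvCell (pvWrite o w) w.1 w.2.1 = w.2.2 := by
  have hj' : w.2.1 < o[w.1].length := by
    simpa [List.getD_eq_getElem?_getD, List.getElem?_eq_getElem hi] using hj
  simp [pvCell, pvWrite, List.getD_eq_getElem?_getD,
    List.getElem?_eq_getElem hi, hj']

theorem pvApply_cell_some (o : List (List Int)) (ws : List (Nat × Nat × Int)) (i j : Nat) (v : Int)
    (hall : ∀ w ∈ ws, w.1 = i ∧ w.2.1 = j → w.2.2 = v)
    (hex : ∃ w ∈ ws, w.1 = i ∧ w.2.1 = j)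
    (hi : i < o.length) (hj : j < (o.getD i []).length) :
    pvCell (pvApply o ws) i j = v := by
  induction ws generalizing o with
  | nil => exact absurd hex (by simp)
  | cons w ws ih =>
      show pvCell (pvApply (pvWrite o w) ws) i j = v
      by_cases hw : w.1 = i ∧ w.2.1 = j
      · have hv : w.2.2 = v := hall w (List.mem_cons_self) hw
        by_cases hex2 : ∃ w' ∈ ws, w'.1 = i ∧ w'.2.1 = j
        · exact ih (pvWrite o w)
            (fun w' hw' => hall w' (List.mem_cons_of_mem _ hw')) hex2
            (by simpa [pvWrite] using hi)
            (by rw [show ((pvWrite o w).getD i []).length = (o.getD i []).length from by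
                  simpa using pvApply_rowlen o [w] i]; exact hj)
        · rw [pvApply_cell_none _ _ _ _ (fun w' hw' hc => hex2 ⟨w', hw', hc⟩)]
          obtain ⟨hw1, hw2⟩ := hw
          subst hw1; subst hw2
          rw [← hv]
          exact pvWrite_cell_self o w hi hj
      · have hex2 : ∃ w' ∈ ws, w'.1 = i ∧ w'.2.1 = j := by
          obtain ⟨w', hw', hc⟩ := hex
          rcases List.mem_cons.mp hw' with rfl | hmem
          · exact absurd hc hw
          · exact ⟨w', hmem, hc⟩
        exact ih (pvWrite o w)
          (fun w' hw' => hall w' (List.mem_cons_of_mem _ hw')) hex2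
          (by simpa [pvWrite] using hi)
          (by rw [show ((pvWrite o w).getD i []).length = (o.getD i []).length from by
                simpa using pvApply_rowlen o [w] i]; exact hj)

theorem pvDecompUnique {R a b a' b' : Nat} (hb : b < R) (hb' : b' < R)
    (h : a*R + b = a'*R + b') : a = a' ∧ b = b' := by
  have hR : 0 < R := Nat.lt_of_le_of_lt (Nat.zero_le b) hb
  have h1 : (a*R + b)/R = a := by
    rw [Nat.mul_comm a R, Nat.mul_add_div hR, Nat.div_eq_of_lt hb]
    omega
  have h2 : (a'*R + b')/R = a' := by
    rw [Nat.mul_comm a' R, Nat.mul_add_div hR, Nat.div_eq_of_lt hb']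
    omega
  have ha : a = a' := by rw [← h1, ← h2, h]
  subst ha
  exact ⟨rfl, by omega⟩

theorem mem_pvWrites (grid : List (List Int)) (w : Nat × Nat × Int) :
    w ∈ pvWrites grid ↔ ∃ r, r < grid.length ∧ ∃ c, c < (grid.headD []).length ∧
      pvG grid r c ≠ 0 ∧ ∃ r2, r2 < grid.length ∧ ∃ c2, c2 < (grid.headD []).length ∧
      pvG grid r2 c2 ≠ 0 ∧
      w = (r*grid.length + r2, c*(grid.headD []).length + c2, pvG grid r2 c2) := by
  simp [pvWrites, List.mem_flatMap, List.mem_range]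

theorem pvIdxLt {R a b : Nat} (ha : a < R) (hb : b < R) : a*R + b < R*R := by
  calc a*R + b < a*R + R := by omega
    _ = (a+1)*R := by ring
    _ ≤ R*R := Nat.mul_le_mul_right R ha

theorem pvZero_cell (n k : Nat) (i j : Nat) :
    pvCell ((List.range n).map (fun _ => List.replicate k (0:Int))) i j = 0 := by
  simp only [pvCell, List.getD_eq_getElem?_getD, List.getElem?_map]
  cases h : (List.range n)[i]? with
  | none => simp
  | some x =>
      simp only [Option.map_some, Option.getD_some, List.getElem?_replicate]
      split <;> simp

theorem solve_length (grid : List (List Int)) :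
    (solve_007bbfb7 grid).length = grid.length * grid.length := by
  rw [solve_eq_pvApply, pvApply_length]
  simp

theorem solve_rowlen (grid : List (List Int)) (i : Nat) (hi : i < grid.length * grid.length) :
    ((solve_007bbfb7 grid).getD i []).length = (grid.headD []).length * (grid.headD []).length := by
  rw [solve_eq_pvApply, pvApply_rowlen]
  simp only [List.getD_eq_getElem?_getD, List.getElem?_map]
  rw [List.getElem?_range hi]
  simp

theorem solve_cell (grid : List (List Int)) (r r2 c c2 : Nat)
    (hr : r < grid.length) (hr2 : r2 < grid.length)
    (hc : c < (grid.headD []).length) (hc2 : c2 < (grid.headD []).length) :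
    pvCell (solve_007bbfb7 grid) (r*grid.length + r2) (c*(grid.headD []).length + c2)
      = if pvG grid r c ≠ 0 ∧ pvG grid r2 c2 ≠ 0 then pvG grid r2 c2 else 0 := by
  rw [solve_eq_pvApply]
  split
  case isTrue h =>
    apply pvApply_cell_some
    · intro w hw hcij
      rw [mem_pvWrites] at hw
      obtain ⟨r', hr', c', hc', hg1, r2', hr2', c2', hc2', hg2, rfl⟩ := hw
      obtain ⟨e1, e2⟩ := pvDecompUnique hr2' hr2 hcij.1
      obtain ⟨e3, e4⟩ := pvDecompUnique hc2' hc2 hcij.2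
      simp [e2, e4]
    · exact ⟨(r*grid.length + r2, c*(grid.headD []).length + c2, pvG grid r2 c2),
        (mem_pvWrites grid _).mpr ⟨r, hr, c, hc, h.1, r2, hr2, c2, hc2, h.2, rfl⟩, rfl, rfl⟩
    · simpa using pvIdxLt hr hr2
    · simp only [List.getD_eq_getElem?_getD, List.getElem?_map]
      rw [List.getElem?_range (pvIdxLt hr hr2)]
      simpa using pvIdxLt hc hc2
  case isFalse h =>
    rw [pvApply_cell_none]
    · exact pvZero_cell _ _ _ _
    · intro w hw hcij
      rw [mem_pvWrites] at hw
      obtain ⟨r', hr', c', hc', hg1, r2', hr2', c2', hc2', hg2, rfl⟩ := hw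
      obtain ⟨e1, e2⟩ := pvDecompUnique hr2' hr2 hcij.1
      obtain ⟨e3, e4⟩ := pvDecompUnique hc2' hc2 hcij.2
      subst e1; subst e2; subst e3; subst e4
      exact h ⟨hg1, hg2⟩

theorem flatMap_singleton_map {α β : Type} (l : List α) (f : α → β) :
    l.flatMap (fun x => [f x]) = l.map f := by
  induction l with
  | nil => rfl
  | cons a l ih => simp [List.flatMap_cons, ih]

theorem alt_eq (grid : List (List Int)) :
    solve_007bbfb7_alt grid =
      (List.range grid.length).flatMap (fun r =>
        (List.range grid.length).map (fun r2 => pvRow grid r r2)) := by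
  unfold solve_007bbfb7_alt
  simp only [PySem.List.foldl_append_eq_flatMap, List.nil_append]
  simp [flatMap_singleton_map, pvRow, pvG]

theorem flatMap_uniform_length {α : Type} (f : Nat → List α) (n k : Nat)
    (hlen : ∀ x, x < n → (f x).length = k) : ((List.range n).flatMap f).length = n*k := by
  induction n with
  | zero => simp
  | succ n ih =>
      rw [List.range_succ, List.flatMap_append, List.length_append,
        ih (fun x hx => hlen x (Nat.lt_succ_of_lt hx))]
      simp only [List.flatMap_cons, List.flatMap_nil, List.append_nil]
      rw [hlen n (Nat.lt_succ_self n), Nat.succ_mul]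

theorem getElem?_flatMap_uniform {α : Type} (f : Nat → List α) (n k a b : Nat)
    (hlen : ∀ x, x < n → (f x).length = k) (ha : a < n) (hb : b < k) :
    ((List.range n).flatMap f)[a*k + b]? = (f a)[b]? := by
  induction n with
  | zero => omega
  | succ n ih =>
      rw [List.range_succ, List.flatMap_append]
      by_cases han : a < n
      · rw [List.getElem?_append_left, ih (fun x hx => hlen x (Nat.lt_succ_of_lt hx)) han]
        rw [flatMap_uniform_length f n k (fun x hx => hlen x (Nat.lt_succ_of_lt hx))]
        calc a*k + b < a*k + k := by omega
          _ = (a+1)*k := by ring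
          _ ≤ n*k := Nat.mul_le_mul_right k han
      · have haeq : a = n := by omega
        subst haeq
        rw [List.getElem?_append_right
          (by rw [flatMap_uniform_length f a k (fun x hx => hlen x (Nat.lt_succ_of_lt hx))]; omega)]
        rw [flatMap_uniform_length f a k (fun x hx => hlen x (Nat.lt_succ_of_lt hx))]
        simp only [List.flatMap_cons, List.flatMap_nil, List.append_nil]
        congr 1
        omega

theorem pre_rowlen (grid : List (List Int)) (hpre : Pre_solve_007bbfb7 grid)
    (r2 : Nat) (hr2 : r2 < grid.length) :
    (grid.headD []).length ≤ (grid.getD r2 []).length := by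
  apply Nat.le_of_ble_eq_true
  apply List.all_eq_true.mp hpre.2
  rw [List.getD_eq_getElem?_getD, List.getElem?_eq_getElem hr2]
  exact List.getElem_mem hr2

theorem pvRow_len (grid : List (List Int)) (hpre : Pre_solve_007bbfb7 grid)
    (r r2 : Nat) (hr2 : r2 < grid.length) :
    (pvRow grid r r2).length = (grid.headD []).length * (grid.headD []).length := by
  unfold pvRow
  apply flatMap_uniform_length
  intro c _
  split
  · rw [List.length_take]
    exact Nat.min_eq_left (pre_rowlen grid hpre r2 hr2)
  · exact List.length_replicate

theorem pvRow_cell (grid : List (List Int)) (hpre : Pre_solve_007bbfb7 grid)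
    (r r2 c c2 : Nat) (hr2 : r2 < grid.length)
    (hc : c < (grid.headD []).length) (hc2 : c2 < (grid.headD []).length) :
    (pvRow grid r r2)[c*(grid.headD []).length + c2]?
      = some (if pvG grid r c ≠ 0 then pvG grid r2 c2 else 0) := by
  unfold pvRow
  rw [getElem?_flatMap_uniform _ _ (grid.headD []).length c c2 ?_ hc hc2]
  · have hlt : c2 < (grid.getD r2 []).length :=
      Nat.lt_of_lt_of_le hc2 (pre_rowlen grid hpre r2 hr2)
    simp only [List.getD_eq_getElem?_getD] at hlt
    by_cases hrc : pvG grid r c ≠ 0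
    · rw [if_pos hrc, if_pos hrc, List.getElem?_take, if_pos hc2]
      simp only [pvG, List.getD_eq_getElem?_getD]
      rw [List.getElem?_eq_getElem hlt]
      simp
    · rw [if_neg hrc, if_neg hrc, List.getElem?_replicate, if_pos hc2]
  · intro x _
    split
    · rw [List.length_take]
      exact Nat.min_eq_left (pre_rowlen grid hpre r2 hr2)
    · exact List.length_replicate

-- ===== VERDICT (by name: the statement is the Claim_ definition above) =====
theorem solve_007bbfb7_spec : Claim_equal_solve_007bbfb7 := by
  intro grid _ hpre
  unfold Spec_solve_007bbfb7
  rw [alt_eq]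
  have hR : 0 < grid.length := by
    cases grid with
    | nil => exact absurd rfl hpre.1
    | cons a l => simp
  have hlenB : ((List.range grid.length).flatMap (fun r =>
      (List.range grid.length).map (fun r2 => pvRow grid r r2))).length
      = grid.length * grid.length :=
    flatMap_uniform_length _ _ _ (fun x _ => by simp)
  apply List.ext_getElem?
  intro i
  by_cases hi : i < grid.length * grid.length
  · have hr : i / grid.length < grid.length := (Nat.div_lt_iff_lt_mul hR).mpr hi
    have hr2 : i % grid.length < grid.length := Nat.mod_lt _ hR
    have hidec : (i / grid.length) * grid.length + i % grid.length = i := by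
      rw [Nat.mul_comm]
      exact Nat.div_add_mod i grid.length
    rw [← hidec]
    rw [getElem?_flatMap_uniform _ _ grid.length _ _ (fun x _ => by simp) hr hr2]
    rw [List.getElem?_map, List.getElem?_range hr2]
    simp only [Option.map_some]
    have hiA : (i / grid.length) * grid.length + i % grid.length
        < (solve_007bbfb7 grid).length := by
      rw [solve_length, hidec]
      exact hi
    rw [List.getElem?_eq_getElem hiA]
    congr 1
    have hgetA : (solve_007bbfb7 grid)[(i / grid.length) * grid.length + i % grid.length]'hiA
        = (solve_007bbfb7 grid).getD ((i / grid.length) * grid.length + i % grid.length) [] := by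
      simp [List.getD_eq_getElem?_getD, List.getElem?_eq_getElem hiA]
    rw [hgetA]
    have hrowlenA : ((solve_007bbfb7 grid).getD ((i / grid.length) * grid.length + i % grid.length) []).length
        = (grid.headD []).length * (grid.headD []).length :=
      solve_rowlen grid _ (by rw [hidec]; exact hi)
    apply List.ext_getElem?
    intro j
    by_cases hj : j < (grid.headD []).length * (grid.headD []).length
    · have hC : 0 < (grid.headD []).length := by
        rcases Nat.eq_zero_or_pos (grid.headD []).length with h0 | h0
        · rw [h0] at hj
          omega
        · exact h0
      have hc : j / (grid.headD []).length < (grid.headD []).length :=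
        (Nat.div_lt_iff_lt_mul hC).mpr hj
      have hc2 : j % (grid.headD []).length < (grid.headD []).length := Nat.mod_lt _ hC
      have hjdec : (j / (grid.headD []).length) * (grid.headD []).length
          + j % (grid.headD []).length = j := by
        rw [Nat.mul_comm]
        exact Nat.div_add_mod j (grid.headD []).length
      rw [← hjdec]
      rw [pvRow_cell grid hpre _ _ _ _ hr2 hc hc2]
      have hjA : (j / (grid.headD []).length) * (grid.headD []).length
          + j % (grid.headD []).length
          < ((solve_007bbfb7 grid).getD ((i / grid.length) * grid.length + i % grid.length) []).length := by
        rw [hrowlenA, hjdec]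
        exact hj
      rw [List.getElem?_eq_getElem hjA]
      congr 1
      have hcell := solve_cell grid (i / grid.length) (i % grid.length)
        (j / (grid.headD []).length) (j % (grid.headD []).length) hr hr2 hc hc2
      have hrow : ((solve_007bbfb7 grid).getD ((i / grid.length) * grid.length + i % grid.length) [])[
          (j / (grid.headD []).length) * (grid.headD []).length + j % (grid.headD []).length]'hjA
          = pvCell (solve_007bbfb7 grid) ((i / grid.length) * grid.length + i % grid.length)
              ((j / (grid.headD []).length) * (grid.headD []).length + j % (grid.headD []).length) := by
        have hjA' := hjA
        simp only [List.getD_eq_getElem?_getD] at hjA'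
        simp only [pvCell, List.getD_eq_getElem?_getD]
        rw [List.getElem?_eq_getElem hjA']
        rfl
      rw [hrow, hcell]
      by_cases ha : pvG grid (i / grid.length) (j / (grid.head?.getD []).length) = 0 <;>
        by_cases hb : pvG grid (i % grid.length) (j % (grid.head?.getD []).length) = 0 <;>
        simp [ha, hb]
    · rw [List.getElem?_eq_none (by rw [hrowlenA]; omega),
        List.getElem?_eq_none (by rw [pvRow_len grid hpre _ _ hr2]; omega)]
  · rw [List.getElem?_eq_none (by rw [solve_length]; omega),
      List.getElem?_eq_none (by rw [hlenB]; omega)]
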